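-- pv_equiv track=rewrite | github.com/Bygokcen/codestepbystep_works | get_days_in_month.py | is_all_vowels
-- ===== SOURCE A (Python) =====
-- def is_all_vowels(x):
--     a=x.lower()
--     b = ["a", "e", "i", "o", "u"]
--     for i in range(0,len(a)):
--         if a[i].isalpha():
--             if a[i] in b:
--                 continue
--             else:
--                 return False
--                 break
--         else:
--             continue
--     return True
-- ===== SOURCE B (Python) =====
-- CONSONANTS = "bcdfghjklmnpqrstvwxyz"
--
-- def is_all_vowels(x):
--     a = x.lower()
--     for c in CONSONANTS:
--         if c in a:
--             return False
--     return True
-- ===== Notes on version B (the rewrite author's own statement) =====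
-- stated objective: alternative
-- what changed: Instead of scanning the string character by character with an isalpha/vowel branch, B scans the fixed 21-letter consonant alphabet and tests each consonant for substring membership in x.lower(): a lowercased ASCII string has only vowels among its letters iff it contains no consonant.
import Mathlib
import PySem

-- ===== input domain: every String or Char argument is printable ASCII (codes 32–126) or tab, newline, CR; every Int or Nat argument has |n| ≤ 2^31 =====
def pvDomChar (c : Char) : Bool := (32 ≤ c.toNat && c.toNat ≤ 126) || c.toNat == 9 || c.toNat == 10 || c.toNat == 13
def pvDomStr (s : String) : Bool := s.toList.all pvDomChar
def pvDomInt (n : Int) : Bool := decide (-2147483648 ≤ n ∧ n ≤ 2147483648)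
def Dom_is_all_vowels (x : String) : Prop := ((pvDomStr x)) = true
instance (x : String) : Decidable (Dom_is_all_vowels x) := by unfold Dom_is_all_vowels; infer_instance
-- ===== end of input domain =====

-- B scans the fixed 21-letter consonant alphabet for substring membership in x.lower()
-- instead of A's per-character loop with an isalpha/vowel branch; return value only, no speed claim.

-- ===== PORT A =====
-- A's for-i-in-range loop over a = x.lower(): structural recursion over the character list,
-- same branch order (isalpha test, then membership in the vowel list, early `return False`).
def isAllVowelsLoop : List Char → Bool
  | [] => true
  | c :: rest =>
    if PySem.Chars.isalpha c then
      if c ∈ ['a', 'e', 'i', 'o', 'u'] then isAllVowelsLoop rest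
      else false
    else isAllVowelsLoop rest

def is_all_vowels (x : String) : Bool :=
  isAllVowelsLoop (PySem.Chars.lower x.toList)

-- ===== PORT B =====
-- B's loop over the constant CONSONANTS string, early `return False` on `c in a`
-- (Python substring test on the one-character string c → PySem.Chars.isIn [c] a).
def consonantScan (a : List Char) : List Char → Bool
  | [] => true
  | c :: rest => if PySem.Chars.isIn [c] a then false else consonantScan a rest

def is_all_vowels_alt (x : String) : Bool :=
  consonantScan (PySem.Chars.lower x.toList) "bcdfghjklmnpqrstvwxyz".toList

-- ===== PRECONDITION & SPEC =====
def Spec_is_all_vowels (x : String) (out : Bool) : Prop := out = is_all_vowels_alt x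
instance (x : String) (out : Bool) : Decidable (Spec_is_all_vowels x out) := by unfold Spec_is_all_vowels; infer_instance

-- ===== CLAIM (what is proved, stated in full; the proofs are below) =====
def Claim_equal_is_all_vowels : Prop := ∀ (x : String), Dom_is_all_vowels x → Spec_is_all_vowels x (is_all_vowels x)

-- ===== LEMMAS AND PROOFS =====

-- A's loop decides "every alphabetic character of l is a vowel".
theorem loop_eq_all (l : List Char) :
    isAllVowelsLoop l
      = decide (∀ c ∈ l, PySem.Chars.isalpha c = true → c ∈ (['a','e','i','o','u'] : List Char)) := by
  induction l with
  | nil => simp [isAllVowelsLoop]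
  | cons c rest ih =>
    simp only [isAllVowelsLoop, ih]
    by_cases ha : PySem.Chars.isalpha c = true
    · by_cases hv : c ∈ (['a','e','i','o','u'] : List Char)
      · simp only [ha, hv, if_pos]
        congr 1
        apply propext
        constructor
        · intro h d hd
          rcases List.mem_cons.mp hd with hd | hd
          · exact fun _ => hd ▸ hv
          · exact h d hd
        · intro h d hd
          exact h d (List.mem_cons_of_mem _ hd)
      · simp only [ha, if_true, hv, if_neg, not_false_iff]
        symm; rw [decide_eq_false_iff_not]
        intro h
        exact hv (h c (List.mem_cons_self ..) ha)
    · simp [ha]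

-- Python's `c in a` for a one-character string is character membership.
theorem isIn_singleton (a : List Char) (c : Char) :
    PySem.Chars.isIn [c] a = decide (c ∈ a) := by
  have hfind : PySem.Chars.find a [c] = -1 ↔ ¬ [c] <:+: a := by
    rw [← PySem.Chars.findFrom_zero]
    exact_mod_cast PySem.Chars.findFrom_natCast_eq_neg_one_iff a [c] 0 (Nat.zero_le _)
  have hmem : [c] <:+: a ↔ c ∈ a := by
    constructor
    · intro h; exact h.mem (List.mem_singleton_self c)
    · intro h; obtain ⟨u, v, rfl⟩ := List.append_of_mem h; exact ⟨u, v, by simp⟩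
  unfold PySem.Chars.isIn
  by_cases h : c ∈ a
  · have : PySem.Chars.find a [c] ≠ -1 := fun he => (hfind.mp he) (hmem.mpr h)
    simp [h, bne_iff_ne, this]
  · have : PySem.Chars.find a [c] = -1 := hfind.mpr (fun hi => h (hmem.mp hi))
    simp [h, this]

-- B's loop decides "no scanned letter occurs in a".
theorem scan_eq_all (a : List Char) (cs : List Char) :
    consonantScan a cs = decide (∀ c ∈ cs, c ∉ a) := by
  induction cs with
  | nil => simp [consonantScan]
  | cons c rest ih =>
    simp only [consonantScan, isIn_singleton, ih]
    by_cases h : c ∈ a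
    · simp [h]
    · simp [h]

-- Per-character fact, decided over the 128 ASCII codes: a lowercased ASCII character
-- is "alphabetic → vowel" exactly when it is not one of the 21 consonant letters.
set_option maxRecDepth 40000 in
theorem perchar_nat : ∀ n, n < 128 →
    ((PySem.Chars.isalpha (PySem.Chars.lowerChar (Char.ofNat n)) = true →
        PySem.Chars.lowerChar (Char.ofNat n) ∈ (['a','e','i','o','u'] : List Char))
      ↔ PySem.Chars.lowerChar (Char.ofNat n) ∉ "bcdfghjklmnpqrstvwxyz".toList) := by
  decide

theorem perchar (c : Char) (hc : pvDomChar c = true) :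
    ((PySem.Chars.isalpha (PySem.Chars.lowerChar c) = true →
        PySem.Chars.lowerChar c ∈ (['a','e','i','o','u'] : List Char))
      ↔ PySem.Chars.lowerChar c ∉ "bcdfghjklmnpqrstvwxyz".toList) := by
  have hlt : c.toNat < 128 := by
    simp only [pvDomChar, Bool.or_eq_true, Bool.and_eq_true, decide_eq_true_eq,
      beq_iff_eq] at hc
    omega
  have := perchar_nat c.toNat hlt
  rwa [Char.ofNat_toNat] at this

-- ===== VERDICT (by name: the statement is the Claim_ definition above) =====
theorem is_all_vowels_spec : Claim_equal_is_all_vowels := by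
  intro x hdom
  unfold Spec_is_all_vowels is_all_vowels is_all_vowels_alt
  rw [loop_eq_all, scan_eq_all]
  apply (decide_eq_decide).mpr
  have hdom' : ∀ c ∈ x.toList, pvDomChar c = true := by
    simpa [Dom_is_all_vowels, pvDomStr, List.all_eq_true] using hdom
  constructor
  · intro h k hk hmem
    simp only [PySem.Chars.lower, List.mem_map] at hmem
    obtain ⟨c, hc, rfl⟩ := hmem
    exact (perchar c (hdom' c hc)).mp
      (h _ (List.mem_map.mpr ⟨c, hc, rfl⟩)) hk
  · intro h d hd
    simp only [PySem.Chars.lower, List.mem_map] at hd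
    obtain ⟨c, hc, rfl⟩ := hd
    exact (perchar c (hdom' c hc)).mpr
      (fun hmem => h _ hmem (List.mem_map.mpr ⟨c, hc, rfl⟩))
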